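-- pv_equiv track=rewrite | github.com/miliar/Code_Jam_Webscraper | solutions_python/Problem_181/2093.py | solve
-- ===== SOURCE A (Python) =====
-- def solve(str):
--     str_list = list(str)
--     tree = []
--     tree.append(str_list[0])
--     for i in range(1, len(str_list)):
--         length = i
--         candidates = []
--         for str in tree:
--             if len(str) == length:
--                 candidates.append(str)
--             elif len(str) > length:
--                 break
--         for candidate in candidates:
--             if candidate[0] > str_list[i]:
--                 tree.append(str_list[i] + candidate)
--                 tree.append(candidate + str_list[i])
--             else:
--                 tree.append(candidate + str_list[i])
--                 tree.append(str_list[i] + candidate)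
--
--     return tree[len(tree) - 1]
-- ===== SOURCE B (Python) =====
-- def solve(str):
--     s = str[0]
--     for c in str[1:]:
--         s = s + c if s[0] > c else c + s
--     return s
-- ===== Notes on version B (the rewrite author's own statement) =====
-- stated objective: faster
-- what changed: B replaces A's exponentially growing tree of permutations (each round doubles the candidate set and rescans the whole tree) by tracking only the single last-candidate string, prepending or appending each next character after comparing it with the current first character.
-- outside the precondition, e.g. on solve(''): A raises IndexError, B raises IndexError
import Mathlib
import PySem

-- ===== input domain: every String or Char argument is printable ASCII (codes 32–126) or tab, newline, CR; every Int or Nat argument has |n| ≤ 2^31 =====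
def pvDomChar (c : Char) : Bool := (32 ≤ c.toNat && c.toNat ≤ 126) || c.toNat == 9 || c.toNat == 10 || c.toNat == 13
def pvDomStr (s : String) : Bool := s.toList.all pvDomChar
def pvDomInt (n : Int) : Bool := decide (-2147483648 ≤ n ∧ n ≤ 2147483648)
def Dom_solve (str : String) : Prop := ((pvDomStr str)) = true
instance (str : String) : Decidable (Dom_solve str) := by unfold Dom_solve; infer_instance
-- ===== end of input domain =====

-- B keeps only the last string A's exponential tree produces: O(n^2) instead of O(2^n).

-- ===== PORT A =====
-- inner 'for str in tree' loop: collect strings of length `len`, break on a longer one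
def collectCands : List (List Char) → Nat → List (List Char)
  | [], _ => []
  | s :: rest, len =>
      if s.length = len then s :: collectCands rest len
      else if s.length > len then []      -- break
      else collectCands rest len

-- the two appends done for one candidate (branch order as in A)
def pairA (c : Char) (cand : List Char) : List (List Char) :=
  if cand.headD ' ' > c then [c :: cand, cand ++ [c]] else [cand ++ [c], c :: cand]

-- one iteration of A's outer 'for i in range(1, len(str_list))' loop
def stepA (sl : List Char) (tree : List (List Char)) (i : Nat) : List (List Char) :=
  tree ++ (collectCands tree i).flatMap (pairA (sl.getD i ' '))

def solve (str : String) : String :=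
  let sl := str.toList
  let tree := (List.range' 1 (sl.length - 1)).foldl (stepA sl) [[sl.headD ' ']]
  String.ofList (tree.getLastD [])        -- tree[len(tree) - 1]

-- ===== PORT B =====
def stepB (acc : List Char) (c : Char) : List Char :=
  if acc.headD ' ' > c then acc ++ [c] else c :: acc

def solve_alt (str : String) : String :=
  match str.toList with
  | [] => ""                              -- unreachable under Pre_solve (str[0] raises)
  | c :: cs => String.ofList (cs.foldl stepB [c])

-- ===== PRECONDITION & SPEC =====
-- A raises IndexError on the empty string (str_list[0]); B's s = str[0] raises there too.
def Pre_solve (str : String) : Prop := str ≠ ""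
instance (str : String) : Decidable (Pre_solve str) := by unfold Pre_solve; infer_instance
def pvWitness_solve : String := ("bca")

def Spec_solve (str : String) (out : String) : Prop := out = solve_alt str
instance (str : String) (out : String) : Decidable (Spec_solve str out) := by unfold Spec_solve; infer_instance

-- ===== CLAIM (what is proved, stated in full; the proofs are below) =====
def Claim_equal_solve : Prop := ∀ (str : String), Dom_solve str → Pre_solve str → Spec_solve str (solve str)

-- ===== LEMMAS AND PROOFS =====

-- the invariant carried through A's outer loop: the tree is a prefix of shorter
-- strings followed by a nonempty block of length-s strings whose last entry is B's accumulator
def TreeInv (s : Nat) (tree : List (List Char)) (acc : List Char) : Prop :=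
  ∃ prev block, tree = prev ++ block ∧ block ≠ [] ∧
    (∀ x ∈ prev, x.length < s) ∧ (∀ x ∈ block, x.length = s) ∧
    block.getLastD [] = acc

theorem getLastD_append_right {α : Type} (xs ys : List α) (d : α) (h : ys ≠ []) :
    (xs ++ ys).getLastD d = ys.getLastD d := by
  induction xs generalizing d with
  | nil => rfl
  | cons x xs ih =>
      rw [List.cons_append, List.getLastD_cons, ih x]
      cases ys with
      | nil => exact absurd rfl h
      | cons y ys' =>
          rw [List.getLastD_eq_getLast?, List.getLastD_eq_getLast?,
            List.getLast?_eq_some_getLast (by simp), Option.getD_some, Option.getD_some]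

theorem collectCands_eq (s : Nat) (prev block : List (List Char))
    (hp : ∀ x ∈ prev, x.length < s) (hb : ∀ x ∈ block, x.length = s) :
    collectCands (prev ++ block) s = block := by
  induction prev with
  | nil =>
      simp only [List.nil_append]
      induction block with
      | nil => simp [collectCands]
      | cons b bs ih =>
          have hbl := hb b (by simp)
          rw [show collectCands (b :: bs) s = b :: collectCands bs s from by
            simp [collectCands, hbl]]
          exact congrArg _ (ih (fun x hx => hb x (by simp [hx])))
  | cons p ps ih =>
      have hpl := hp p (by simp)
      have h1 : ¬ p.length = s := by omega
      have h2 : ¬ p.length > s := by omega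
      simp only [List.cons_append, collectCands, if_neg h1, if_neg h2]
      exact ih (fun x hx => hp x (by simp [hx]))

theorem pairA_ne (c : Char) (cand : List Char) : pairA c cand ≠ [] := by
  unfold pairA; split <;> simp

theorem pairA_last (c : Char) (cand : List Char) :
    (pairA c cand).getLastD [] = stepB cand c := by
  unfold pairA stepB; split <;> simp

theorem pairA_len (c : Char) (cand : List Char) (x : List Char) (hx : x ∈ pairA c cand) :
    x.length = cand.length + 1 := by
  unfold pairA at hx
  split at hx <;> simp at hx <;> rcases hx with h | h <;> simp [h]

theorem flatMap_pairA_last (c : Char) (block : List (List Char)) (hb : block ≠ []) :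
    (block.flatMap (pairA c)).getLastD [] = stepB (block.getLastD []) c := by
  induction block with
  | nil => exact absurd rfl hb
  | cons b bs ih =>
      cases bs with
      | nil =>
          simp only [List.flatMap_cons, List.flatMap_nil, List.append_nil, List.getLastD_cons]
          exact pairA_last c b
      | cons b' bs' =>
          have hne : ((b' :: bs').flatMap (pairA c)) ≠ [] := by
            simp only [List.flatMap_cons]
            intro h
            rw [List.append_eq_nil_iff] at h
            exact pairA_ne c b' h.1
          simp only [List.flatMap_cons]
          rw [getLastD_append_right _ _ _ (by simpa [List.flatMap_cons] using hne)]
          simpa [List.flatMap_cons] using ih (by simp)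

theorem stepA_inv (sl : List Char) (s : Nat) (tree : List (List Char)) (acc : List Char)
    (h : TreeInv s tree acc) :
    TreeInv (s + 1) (stepA sl tree s) (stepB acc (sl.getD s ' ')) := by
  obtain ⟨prev, block, htree, hbne, hp, hb, hlast⟩ := h
  set c := sl.getD s ' ' with hc
  refine ⟨tree, block.flatMap (pairA c), ?_, ?_, ?_, ?_, ?_⟩
  · unfold stepA
    rw [← hc, htree, collectCands_eq s prev block hp hb]
  · cases block with
    | nil => exact absurd rfl hbne
    | cons b bs =>
        simp only [List.flatMap_cons]
        intro h
        rw [List.append_eq_nil_iff] at h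
        exact pairA_ne c b h.1
  · intro x hx
    rw [htree] at hx
    rcases List.mem_append.1 hx with h | h
    · exact Nat.lt_succ_of_lt (hp x h)
    · exact Nat.lt_succ_of_le (Nat.le_of_eq (hb x h))
  · intro x hx
    obtain ⟨cand, hcand, hxp⟩ := List.mem_flatMap.1 hx
    rw [pairA_len c cand x hxp, hb cand hcand]
  · rw [flatMap_pairA_last c block hbne, hlast]

theorem inv_getLast (s : Nat) (tree : List (List Char)) (acc : List Char)
    (h : TreeInv s tree acc) : tree.getLastD [] = acc := by
  obtain ⟨prev, block, htree, hbne, _, _, hlast⟩ := h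
  rw [htree, getLastD_append_right _ _ _ hbne, hlast]

theorem loop_eq (cs' : List Char) : ∀ (s : Nat) (sl : List Char)
    (tree : List (List Char)) (acc : List Char),
    sl.drop s = cs' → TreeInv s tree acc →
    ((List.range' s cs'.length).foldl (stepA sl) tree).getLastD []
      = cs'.foldl stepB acc := by
  induction cs' with
  | nil => intro s sl tree acc _ h; simpa using inv_getLast s tree acc h
  | cons c cs ih =>
      intro s sl tree acc hdrop h
      have hget : sl.getD s ' ' = c := by
        rw [List.getD_eq_getElem?_getD, ← List.head?_drop, hdrop]; rfl
      have hdrop' : sl.drop (s + 1) = cs := by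
        rw [← List.drop_drop, hdrop]; simp
      simp only [List.length_cons, List.range'_succ, List.foldl_cons]
      rw [ih (s + 1) sl _ _ hdrop' (by simpa [hget] using stepA_inv sl s tree acc h),
        show sl[s]?.getD ' ' = c from by rw [← List.getD_eq_getElem?_getD]; exact hget]

-- ===== VERDICT (by name: the statement is the Claim_ definition above) =====
theorem solve_spec : Claim_equal_solve := by
  intro str _ hpre
  unfold Spec_solve solve solve_alt
  obtain ⟨c, cs, hcs⟩ : ∃ c cs, str.toList = c :: cs := by
    cases h : str.toList with
    | nil =>
        exfalso; apply hpre
        have : str.toList = ("" : String).toList := by simpa using h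
        exact String.toList_inj.mp this
    | cons c cs => exact ⟨c, cs, rfl⟩
  simp only [hcs]
  rw [show (c :: cs).length - 1 = cs.length by simp]
  congr 1
  exact loop_eq cs 1 (c :: cs) [[c]] [c] (by simp)
    ⟨[], [[c]], by simp, by simp, by simp, by simp, by simp⟩
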